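-- pv_equiv track=rewrite | github.com/wongzc/NUS_IT5001_PE_answer | solution/IT5001 2021_22 SEM2 PE.py | text_compression
-- ===== SOURCE A (Python) =====
-- def text_compression(text):
--     d={}
--     ans=[]
--     for i,word in enumerate(text.split()):
--         lowerWord=word.lower()
--         if len(lowerWord)==1:
--             ans.append(word)
--         elif lowerWord not in d:
--             ans.append(word)
--             d[lowerWord]=str(i+1)
--         else:
--             ans.append(d[lowerWord])
--
--     return ' '.join(ans)
-- ===== SOURCE B (Python) =====
-- def text_compression(text):
--     words = text.split()
--     first = {}
--     for i, w in enumerate(words):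
--         lw = w.lower()
--         if len(lw) > 1 and lw not in first:
--             first[lw] = i
--     out = []
--     for i, w in enumerate(words):
--         lw = w.lower()
--         if len(lw) == 1 or first[lw] == i:
--             out.append(w)
--         else:
--             out.append(str(first[lw] + 1))
--     return ' '.join(out)
-- ===== Notes on version B (the rewrite author's own statement) =====
-- stated objective: alternative
-- what changed: Replaces A's fused single pass (dict and output built together, dict storing string positions) by a build-index-then-map decomposition: one pass builds a first-occurrence index dict mapping lowercased multi-char words to their integer position, a second pass maps each word through that completed index, deciding first occurrence by comparing indices.
import Mathlib
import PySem

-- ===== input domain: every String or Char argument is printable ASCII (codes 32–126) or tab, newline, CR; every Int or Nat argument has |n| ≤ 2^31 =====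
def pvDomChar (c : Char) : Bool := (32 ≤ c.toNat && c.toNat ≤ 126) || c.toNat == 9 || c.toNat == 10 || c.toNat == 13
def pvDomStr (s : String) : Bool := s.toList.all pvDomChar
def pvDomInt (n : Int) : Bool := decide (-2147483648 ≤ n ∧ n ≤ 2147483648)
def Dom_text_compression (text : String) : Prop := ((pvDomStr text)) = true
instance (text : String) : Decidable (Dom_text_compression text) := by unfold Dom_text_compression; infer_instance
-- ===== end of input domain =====

-- B replaces A's fused single pass by a build-index-then-map decomposition (same cost): an 'alternative' restructuring.

-- ===== PORT A =====
-- A: one fused pass; a dict maps lowercased multi-char words to str(position) and the answer is built alongside.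
def text_compression (text : String) : String :=
  let st := (PySem.List.enumerate (PySem.Str.split₀ text)).foldl
    (fun (st : PySem.Dict String String × List String) p =>
      let lowerWord := PySem.Str.lower p.2
      if PySem.Str.len lowerWord == 1 then (st.1, st.2 ++ [p.2])
      else if !st.1.contains lowerWord then
        (st.1.insert lowerWord (PySem.Int.toStr (p.1 + 1)), st.2 ++ [p.2])
      else (st.1, st.2 ++ [st.1.getD lowerWord ""]))
    (PySem.Dict.empty, [])
  PySem.Str.join " " st.2

-- ===== PORT B =====
-- B: pass 1 builds the complete first-occurrence index (lowercased word → integer position),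
--    pass 2 maps each word through that finished index.
def text_compression_alt (text : String) : String :=
  let words := PySem.Str.split₀ text
  let first := (PySem.List.enumerate words).foldl
    (fun (d : PySem.Dict String Int) p =>
      let lw := PySem.Str.lower p.2
      if decide (1 < PySem.Str.len lw) && !d.contains lw then d.insert lw p.1 else d)
    PySem.Dict.empty
  let out := (PySem.List.enumerate words).map (fun p =>
    let lw := PySem.Str.lower p.2
    if PySem.Str.len lw == 1 || first.getD lw 0 == p.1 then p.2
    else PySem.Int.toStr (first.getD lw 0 + 1))
  PySem.Str.join " " out

-- ===== PRECONDITION & SPEC =====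
def Spec_text_compression (text : String) (out : String) : Prop := out = text_compression_alt text
instance (text : String) (out : String) : Decidable (Spec_text_compression text out) := by unfold Spec_text_compression; infer_instance

-- ===== CLAIM (what is proved, stated in full; the proofs are below) =====
def Claim_equal_text_compression : Prop := ∀ (text : String), Dom_text_compression text → Spec_text_compression text (text_compression text)

-- ===== LEMMAS AND PROOFS =====

-- A's loop body (named for the proofs; definitionally equal to the lambda `text_compression` folds).
def tcStepA (st : PySem.Dict String String × List String) (p : Int × String) :
    PySem.Dict String String × List String :=
  if PySem.Str.len (PySem.Str.lower p.2) == 1 then (st.1, st.2 ++ [p.2])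
  else if !st.1.contains (PySem.Str.lower p.2) then
    (st.1.insert (PySem.Str.lower p.2) (PySem.Int.toStr (p.1 + 1)), st.2 ++ [p.2])
  else (st.1, st.2 ++ [st.1.getD (PySem.Str.lower p.2) ""])

-- B's pass-1 body.
def tcStepB (d : PySem.Dict String Int) (p : Int × String) : PySem.Dict String Int :=
  if decide (1 < PySem.Str.len (PySem.Str.lower p.2)) && !d.contains (PySem.Str.lower p.2) then
    d.insert (PySem.Str.lower p.2) p.1
  else d

-- B's pass-2 body, reading the finished index `first`.
def tcMapB (first : PySem.Dict String Int) (p : Int × String) : String :=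
  if PySem.Str.len (PySem.Str.lower p.2) == 1
      || first.getD (PySem.Str.lower p.2) 0 == p.1 then p.2
  else PySem.Int.toStr (first.getD (PySem.Str.lower p.2) 0 + 1)

-- pass 1 never overwrites: present keys keep their value through the rest of the fold
lemma tc_pass1_preserve (ps : List (Int × String)) (d : PySem.Dict String Int)
    (k : String) (v : Int) (h : d.get? k = some v) :
    (ps.foldl tcStepB d).get? k = some v := by
  induction ps generalizing d with
  | nil => exact h
  | cons p rest ih =>
    simp only [List.foldl_cons]
    apply ih
    unfold tcStepB
    by_cases hcond : (decide (1 < PySem.Str.len (PySem.Str.lower p.2))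
        && !d.contains (PySem.Str.lower p.2)) = true
    · rw [if_pos hcond]
      have hc : d.contains (PySem.Str.lower p.2) = false := by
        simp only [Bool.and_eq_true, Bool.not_eq_true'] at hcond
        exact hcond.2
      have hne : k ≠ PySem.Str.lower p.2 := by
        intro he
        rw [PySem.Dict.contains_eq_isSome_get?, ← he, h] at hc
        simp at hc
      rw [PySem.Dict.get?_insert, if_neg hne]
      exact h
    · rw [if_neg hcond]
      exact h

-- the dicts of A's pass and B's pass-1 stay in lockstep: A stores str(j+1) where B stores j
def tcRel (d1 : PySem.Dict String String) (d2 : PySem.Dict String Int) : Prop :=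
  ∀ k, d1.get? k = (d2.get? k).map (fun j => PySem.Int.toStr (j + 1))

lemma tc_main (ps : List (Int × String)) (d1 : PySem.Dict String String)
    (d2 : PySem.Dict String Int) (ans : List String)
    (hne : ∀ p ∈ ps, PySem.Str.len (PySem.Str.lower p.2) ≠ 0)
    (hrel : tcRel d1 d2)
    (hlt : ∀ k v, d2.get? k = some v → ∀ p ∈ ps, v < p.1)
    (hsort : ps.Pairwise (fun p q => p.1 < q.1)) :
    (ps.foldl tcStepA (d1, ans)).2 = ans ++ ps.map (tcMapB (ps.foldl tcStepB d2)) := by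
  induction ps generalizing d1 d2 ans with
  | nil => simp
  | cons p rest ih =>
    have hlen0 : PySem.Str.len (PySem.Str.lower p.2) ≠ 0 := hne p (by simp)
    have hlennn : 0 ≤ PySem.Str.len (PySem.Str.lower p.2) := by
      simp [PySem.Str.len]
    have hhead : ∀ q ∈ rest, p.1 < q.1 := (List.pairwise_cons.mp hsort).1
    have hsort' := (List.pairwise_cons.mp hsort).2
    have hne' : ∀ q ∈ rest, PySem.Str.len (PySem.Str.lower q.2) ≠ 0 := by
      intro q hq; exact hne q (by simp [hq])
    simp only [List.foldl_cons, List.map_cons]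
    by_cases h1 : (PySem.Str.len (PySem.Str.lower p.2) == 1) = true
    · -- single-character word: both keep the word, dicts untouched
      have hA : tcStepA (d1, ans) p = (d1, ans ++ [p.2]) := by
        unfold tcStepA; rw [if_pos h1]
      have h1i : PySem.Str.len (PySem.Str.lower p.2) = 1 := by simpa using h1
      have hB : tcStepB d2 p = d2 := by
        unfold tcStepB
        rw [if_neg]
        intro hcond
        rw [Bool.and_eq_true, decide_eq_true_eq] at hcond
        exact absurd hcond.1 (by omega)
      rw [hA, hB]
      have hmap : tcMapB (rest.foldl tcStepB d2) p = p.2 := by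
        unfold tcMapB
        rw [if_pos (by simp only [h1, Bool.true_or])]
      rw [ih d1 d2 (ans ++ [p.2]) hne' hrel
        (fun k v hv q hq => hlt k v hv q (by simp [hq])) hsort', hmap]
      simp
    · have h1' : (PySem.Str.len (PySem.Str.lower p.2) == 1) = false := by
        simp only [Bool.not_eq_true] at h1; exact h1
      have hgt : (1 : Int) < PySem.Str.len (PySem.Str.lower p.2) := by
        have := h1'
        simp only [beq_eq_false_iff_ne, ne_eq] at this; omega
      have h1n : ¬ (PySem.Chars.lower p.2.toList).length = 1 := by
        intro hx
        rw [beq_eq_false_iff_ne] at h1'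
        exact h1' (by simp [PySem.Str.len, PySem.Str.toList_lower, hx])
      by_cases hc : d1.contains (PySem.Str.lower p.2) = true
      · -- repeat occurrence: A looks up str(j+1); B finds the stored index j ≠ p.1
        obtain ⟨j, hj⟩ : ∃ j, d2.get? (PySem.Str.lower p.2) = some j := by
          rw [PySem.Dict.contains_eq_isSome_get?, hrel] at hc
          cases hget : d2.get? (PySem.Str.lower p.2) with
          | none => rw [hget] at hc; simp at hc
          | some j => exact ⟨j, rfl⟩
        have hd1 : d1.get? (PySem.Str.lower p.2) = some (PySem.Int.toStr (j + 1)) := by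
          rw [hrel, hj]; rfl
        have hA : tcStepA (d1, ans) p = (d1, ans ++ [PySem.Int.toStr (j + 1)]) := by
          unfold tcStepA
          rw [if_neg (by simp [h1n]), if_neg (by simp [hc]),
            PySem.Dict.getD_eq_get?_getD, hd1]
          rfl
        have hc2 : d2.contains (PySem.Str.lower p.2) = true := by
          rw [PySem.Dict.contains_eq_isSome_get?, hj]; rfl
        have hB : tcStepB d2 p = d2 := by
          unfold tcStepB; rw [if_neg (by simp [hc2])]
        rw [hA, hB]
        have hDj : (rest.foldl tcStepB d2).get? (PySem.Str.lower p.2) = some j :=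
          tc_pass1_preserve rest d2 _ j hj
        have hjlt : j < p.1 := hlt _ j hj p (by simp)
        have hmap : tcMapB (rest.foldl tcStepB d2) p = PySem.Int.toStr (j + 1) := by
          unfold tcMapB
          have hg : (rest.foldl tcStepB d2).getD (PySem.Str.lower p.2) 0 = j := by
            rw [PySem.Dict.getD_eq_get?_getD, hDj]; rfl
          rw [hg, if_neg]
          intro hx
          rw [Bool.or_eq_true, beq_iff_eq, beq_iff_eq] at hx
          rcases hx with hx | hx <;> omega
        rw [ih d1 d2 (ans ++ [PySem.Int.toStr (j + 1)]) hne' hrel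
          (fun k v hv q hq => hlt k v hv q (by simp [hq])) hsort', hmap]
        simp
      · -- first occurrence: A inserts str(i+1) and keeps the word; B inserts i, later reads i back
        have hcf : d1.contains (PySem.Str.lower p.2) = false := by
          simpa using hc
        have hd2 : d2.get? (PySem.Str.lower p.2) = none := by
          rw [PySem.Dict.contains_eq_isSome_get?, hrel] at hcf
          cases hget : d2.get? (PySem.Str.lower p.2) with
          | none => rfl
          | some j => rw [hget] at hcf; simp at hcf
        have hc2 : d2.contains (PySem.Str.lower p.2) = false := by
          rw [PySem.Dict.contains_eq_isSome_get?, hd2]; rfl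
        have hA : tcStepA (d1, ans) p
            = (d1.insert (PySem.Str.lower p.2) (PySem.Int.toStr (p.1 + 1)), ans ++ [p.2]) := by
          unfold tcStepA
          rw [if_neg (by simp [h1n]), if_pos (by simp [hcf])]
        have hgtn : 1 < (PySem.Chars.lower p.2.toList).length := by
          have h2 := hgt
          simp only [PySem.Str.len, PySem.Str.toList_lower] at h2
          exact_mod_cast h2
        have hB : tcStepB d2 p = d2.insert (PySem.Str.lower p.2) p.1 := by
          unfold tcStepB; rw [if_pos (by simp [hc2, hgtn])]
        rw [hA, hB]
        have hrel' : tcRel (d1.insert (PySem.Str.lower p.2) (PySem.Int.toStr (p.1 + 1)))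
            (d2.insert (PySem.Str.lower p.2) p.1) := by
          intro k
          rw [PySem.Dict.get?_insert, PySem.Dict.get?_insert]
          by_cases hk : k = PySem.Str.lower p.2
          · simp [hk]
          · simp [hk, hrel k]
        have hlt' : ∀ k v, (d2.insert (PySem.Str.lower p.2) p.1).get? k = some v →
            ∀ q ∈ rest, v < q.1 := by
          intro k v hv q hq
          rw [PySem.Dict.get?_insert] at hv
          by_cases hk : k = PySem.Str.lower p.2
          · simp [hk] at hv; rw [← hv]; exact hhead q hq
          · simp [hk] at hv; exact hlt k v hv q (by simp [hq])
        have hDi : (rest.foldl tcStepB (d2.insert (PySem.Str.lower p.2) p.1)).get?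
            (PySem.Str.lower p.2) = some p.1 :=
          tc_pass1_preserve rest _ _ p.1 (PySem.Dict.get?_insert_self _ _ _)
        have hmap : tcMapB (rest.foldl tcStepB (d2.insert (PySem.Str.lower p.2) p.1)) p = p.2 := by
          unfold tcMapB
          have hg : (rest.foldl tcStepB (d2.insert (PySem.Str.lower p.2) p.1)).getD
              (PySem.Str.lower p.2) 0 = p.1 := by
            rw [PySem.Dict.getD_eq_get?_getD, hDi]; rfl
          rw [if_pos (by simp only [hg, beq_self_eq_true, Bool.or_true])]
        rw [ih _ _ (ans ++ [p.2]) hne' hrel' hlt' hsort', hmap]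
        simp

-- words produced by split() are nonempty
lemma tc_split₀_go_ne_nil (s cur : List Char) (acc : List (List Char))
    (hacc : ∀ a ∈ acc, a ≠ ([] : List Char)) :
    ∀ w ∈ PySem.Chars.split₀.go s cur acc, w ≠ ([] : List Char) := by
  induction s generalizing cur acc with
  | nil =>
    intro w hw
    unfold PySem.Chars.split₀.go at hw
    split at hw
    · exact hacc w (List.mem_reverse.mp hw)
    · rename_i hcur
      rcases List.mem_cons.mp (List.mem_reverse.mp hw) with h | h
      · subst h
        intro hrev
        exact hcur (by simp [List.reverse_eq_nil_iff.mp hrev])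
      · exact hacc w h
  | cons c rest ih =>
    intro w hw
    unfold PySem.Chars.split₀.go at hw
    split at hw
    · split at hw
      · exact ih [] acc hacc w hw
      · rename_i hcur
        apply ih [] (cur.reverse :: acc) _ w hw
        intro a ha
        rcases List.mem_cons.mp ha with h | h
        · subst h
          intro hrev
          exact hcur (by simp [List.reverse_eq_nil_iff.mp hrev])
        · exact hacc a h
    · exact ih (c :: cur) acc hacc w hw

lemma tc_split₀_word_len (text : String) :
    ∀ p ∈ PySem.List.enumerate (PySem.Str.split₀ text) 0,
      PySem.Str.len (PySem.Str.lower p.2) ≠ 0 := by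
  intro p hp
  have hmem : p.2 ∈ PySem.Str.split₀ text := by
    rcases (PySem.List.mem_enumerate_iff _ _ _).mp hp with ⟨k, hk, hpe⟩
    rw [hpe]; exact List.getElem_mem hk
  unfold PySem.Str.split₀ at hmem
  rcases List.mem_map.mp hmem with ⟨l, hl, hle⟩
  have hlne : l ≠ [] :=
    tc_split₀_go_ne_nil text.toList [] [] (by simp) l hl
  rw [← hle]
  simp only [PySem.Str.len, PySem.Str.toList_lower, PySem.Chars.lower, List.length_map,
    String.toList_ofList]
  simpa using hlne

-- ===== VERDICT (by name: the statement is the Claim_ definition above) =====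
theorem text_compression_spec : Claim_equal_text_compression := by
  intro text _
  unfold Spec_text_compression text_compression text_compression_alt
  have e1 : (fun (st : PySem.Dict String String × List String) (p : Int × String) =>
      let lowerWord := PySem.Str.lower p.2
      if PySem.Str.len lowerWord == 1 then (st.1, st.2 ++ [p.2])
      else if !st.1.contains lowerWord then
        (st.1.insert lowerWord (PySem.Int.toStr (p.1 + 1)), st.2 ++ [p.2])
      else (st.1, st.2 ++ [st.1.getD lowerWord ""])) = tcStepA := rfl
  have e2 : (fun (d : PySem.Dict String Int) (p : Int × String) =>
      let lw := PySem.Str.lower p.2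
      if decide (1 < PySem.Str.len lw) && !d.contains lw then d.insert lw p.1 else d) = tcStepB := rfl
  have e3 : ∀ first : PySem.Dict String Int, (fun (p : Int × String) =>
      let lw := PySem.Str.lower p.2
      if PySem.Str.len lw == 1 || first.getD lw 0 == p.1 then p.2
      else PySem.Int.toStr (first.getD lw 0 + 1)) = tcMapB first := fun _ => rfl
  simp only [e1, e2, e3]
  have h := tc_main (PySem.List.enumerate (PySem.Str.split₀ text) 0)
    PySem.Dict.empty PySem.Dict.empty []
    (tc_split₀_word_len text)
    (fun k => by simp [PySem.Dict.get?_empty])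
    (fun k v hv => by rw [PySem.Dict.get?_empty] at hv; cases hv)
    (PySem.List.pairwise_lt_enumerate _ _)
  rw [h]
  simp
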